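-- pv_equiv track=rewrite | github.com/thomassajot/epi | epi_judge_python/is_string_decomposable_into_words.py | decompose_into_dictionary_words_tabulation
-- ===== SOURCE A (Python) =====
-- from typing import List, Set
--
-- def decompose_into_dictionary_words_tabulation(domain: str, dictionary: Set[str]) -> List[str]:
--     # n = domain size, s = size of dictionary
--     # Time Complexity: O()
--     # Space Complexity: O(n)
--     table = [0] * len(domain)
--     for idx in range(len(domain)):  # O(n)
--         if domain[:idx + 1] in dictionary:  # O(n) (at most)
--             table[idx] = idx + 1
--             continue
--
--         for prev_idx in range(idx):  # O(n)
--             if table[prev_idx] != 0 and domain[prev_idx + 1: idx + 1] in dictionary:  # O(n) (at most)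
--                 table[idx] = idx - prev_idx
--                 break
--
--     decompositions = []
--     if table[-1] != 0:
--         idx = len(table) - 1
--         while idx >= 0:
--             decompositions.append(domain[idx + 1 - table[idx]: idx + 1])
--             idx -= table[idx]
--     return decompositions[::-1]
-- ===== SOURCE B (Python) =====
-- def decompose_into_dictionary_words_tabulation(domain, dictionary):
--     # DP: for each end position keep the LONGEST dictionary word that can end there,
--     # found as a maximum over the distinct word lengths (hash-set membership); then
--     # the cut positions are collected and sliced in one comprehension.
--     words = set(dictionary)
--     lens = {len(w) for w in dictionary if w}
--     n = len(domain)
--     table = [0] * n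
--     for idx in range(n):
--         best = 0
--         for L in lens:
--             if (L <= idx + 1 and (L == idx + 1 or table[idx - L])
--                     and domain[idx + 1 - L: idx + 1] in words and best < L):
--                 best = L
--         if best:
--             table[idx] = best
--     if not table or not table[-1]:
--         return []
--     cuts = []
--     idx = n - 1
--     while idx >= 0:
--         cuts.append((idx + 1 - table[idx], idx + 1))
--         idx -= table[idx]
--     return [domain[a:b] for a, b in reversed(cuts)]
-- ===== Notes on version B (the rewrite author's own statement) =====
-- stated objective: faster
-- what changed: A scans all previous positions per index and tests each slice by membership in the raw dictionary; B instead takes, per index, the maximum valid length over the set of distinct word lengths with hash-set membership, and reconstructs by collecting cut positions and slicing them in one comprehension instead of append-then-reverse of slices.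
import Mathlib
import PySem

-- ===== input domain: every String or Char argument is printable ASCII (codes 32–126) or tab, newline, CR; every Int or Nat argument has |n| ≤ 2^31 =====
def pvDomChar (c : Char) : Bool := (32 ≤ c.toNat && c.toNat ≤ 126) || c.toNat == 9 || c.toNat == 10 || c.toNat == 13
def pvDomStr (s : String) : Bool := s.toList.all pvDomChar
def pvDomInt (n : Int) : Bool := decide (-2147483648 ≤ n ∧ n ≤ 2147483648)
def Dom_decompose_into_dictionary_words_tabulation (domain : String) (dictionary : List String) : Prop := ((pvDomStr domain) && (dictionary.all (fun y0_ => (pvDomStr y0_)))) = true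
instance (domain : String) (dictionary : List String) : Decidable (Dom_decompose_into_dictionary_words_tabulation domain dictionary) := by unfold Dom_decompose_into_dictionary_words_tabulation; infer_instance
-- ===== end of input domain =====

-- B replaces A's scan over all previous positions (list membership per slice) by a per-index maximum
-- over the distinct dictionary word lengths against a word set, and reconstructs via collected cut
-- positions (objective: faster, asymptotically fewer checks).


-- ===== PORT A =====
-- Slices with nonnegative Nat bounds are ported as drop/take (exact: Python clamps the same way);
-- the reconstruction slice keeps Python's Int bounds via PySem.List.slice.

-- inner 'for prev_idx in range(idx): … break' loop
def pvAScan (cs : List Char) (dictL : List (List Char)) (table : List Nat) (idx : Nat) :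
    List Nat → Option Nat
  | [] => none
  | p :: ps =>
      if table.getD p 0 ≠ 0 ∧ (cs.drop (p + 1)).take (idx - p) ∈ dictL then some (idx - p)
      else pvAScan cs dictL table idx ps

-- one iteration of 'for idx in range(len(domain))' (a scan returning none writes nothing: table[idx] stays 0)
def pvAStep (cs : List Char) (dictL : List (List Char)) (table : List Nat) (idx : Nat) : List Nat :=
  if cs.take (idx + 1) ∈ dictL then table.set idx (idx + 1)
  else
    match pvAScan cs dictL table idx (List.range idx) with
    | some v => table.set idx v
    | none => table

-- 'while idx >= 0' loop appending slices; fuel only makes the recursion total (Python's loop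
-- always terminates here because every chained table entry is positive)
def pvABuild (cs : List Char) (table : List Nat) : Nat → Int → List (List Char)
  | 0, _ => []
  | fuel + 1, idx =>
      if idx < 0 then []
      else
        let t : Nat := table.getD idx.toNat 0
        PySem.List.slice cs (some (idx + 1 - (t : Int))) (some (idx + 1)) ::
          pvABuild cs table fuel (idx - (t : Int))

def decompose_into_dictionary_words_tabulation (domain : String) (dictionary : List String) : List String :=
  let cs := domain.toList
  let dictL := dictionary.map String.toList
  let table := (List.range cs.length).foldl (pvAStep cs dictL) (List.replicate cs.length 0)
  match PySem.List.pyGet? table (-1) with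
  | none => []      -- table[-1] on an empty table: Python raises IndexError; excluded by Pre_
  | some t =>
      if t ≠ 0 then
        ((pvABuild cs table (cs.length + 1) ((cs.length : Int) - 1)).reverse).map String.ofList
      else []

-- ===== PORT B =====
-- 'best = 0; for L in lens: if …: best = L' — a fold over the distinct word lengths keeping the
-- maximum valid one (the Python iterates a set; the result is order-independent, see pvFoldBest below)
def pvBBest (cs : List Char) (words : PySem.Set (List Char)) (lens : List Nat)
    (table : List Nat) (idx : Nat) : Nat :=
  lens.foldl (fun best L =>
    if L ≤ idx + 1 ∧ (L = idx + 1 ∨ table.getD (idx - L) 0 ≠ 0) ∧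
        (cs.drop (idx + 1 - L)).take L ∈ words ∧ best < L then L else best) 0

-- 'if best: table[idx] = best'
def pvBStep (cs : List Char) (words : PySem.Set (List Char)) (lens : List Nat)
    (table : List Nat) (idx : Nat) : List Nat :=
  if pvBBest cs words lens table idx ≠ 0 then table.set idx (pvBBest cs words lens table idx)
  else table

-- 'while idx >= 0: cuts.append((idx + 1 - table[idx], idx + 1)); idx -= table[idx]'
def pvBCuts (table : List Nat) : Nat → Int → List (Int × Int)
  | 0, _ => []
  | fuel + 1, idx =>
      if idx < 0 then []
      else
        let t : Nat := table.getD idx.toNat 0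
        (idx + 1 - (t : Int), idx + 1) :: pvBCuts table fuel (idx - (t : Int))

def decompose_into_dictionary_words_tabulation_alt (domain : String) (dictionary : List String) : List String :=
  let cs := domain.toList
  let words : PySem.Set (List Char) := PySem.Set.ofList (dictionary.map String.toList)
  let lens : List Nat :=
    PySem.Set.ofList (((dictionary.map String.toList).filter (fun w => w ≠ [])).map List.length)
  let table := (List.range cs.length).foldl (pvBStep cs words lens) (List.replicate cs.length 0)
  -- 'if not table or not table[-1]: return []' (getD 0 on the empty table = the short-circuit)
  if table.getLast?.getD 0 = 0 then []
  else
    ((pvBCuts table (cs.length + 1) ((cs.length : Int) - 1)).reverse).map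
      (fun c => String.ofList (PySem.List.slice cs (some c.1) (some c.2)))

-- ===== PRECONDITION & SPEC =====
-- Pre_ excludes only the empty domain string, on which Python A raises IndexError (table[-1] on []).
def Pre_decompose_into_dictionary_words_tabulation (domain : String) (dictionary : List String) : Prop :=
  domain.toList ≠ []
instance (domain : String) (dictionary : List String) : Decidable (Pre_decompose_into_dictionary_words_tabulation domain dictionary) := by unfold Pre_decompose_into_dictionary_words_tabulation; infer_instance

def pvWitness_decompose_into_dictionary_words_tabulation : String × List String := ("ab", ["a", "b"])

def Spec_decompose_into_dictionary_words_tabulation (domain : String) (dictionary : List String) (out : List String) : Prop := out = decompose_into_dictionary_words_tabulation_alt domain dictionary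
instance (domain : String) (dictionary : List String) (out : List String) : Decidable (Spec_decompose_into_dictionary_words_tabulation domain dictionary out) := by unfold Spec_decompose_into_dictionary_words_tabulation; infer_instance

-- ===== CLAIM (what is proved, stated in full; the proofs are below) =====
def Claim_equal_decompose_into_dictionary_words_tabulation : Prop := ∀ (domain : String) (dictionary : List String), Dom_decompose_into_dictionary_words_tabulation domain dictionary → Pre_decompose_into_dictionary_words_tabulation domain dictionary → Spec_decompose_into_dictionary_words_tabulation domain dictionary (decompose_into_dictionary_words_tabulation domain dictionary)

-- ===== LEMMAS AND PROOFS =====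

-- descending list idx+1, idx, …, 1 — the order in which A tries last-word lengths
def pvDesc (m : Nat) : List Nat := (List.range m).map (fun k => m - k)

theorem pvDesc_succ (m : Nat) : pvDesc (m + 1) = (m + 1) :: pvDesc m := by
  simp [pvDesc, List.range_succ_eq_map, List.map_map]

theorem pvDesc_mem (m x : Nat) : x ∈ pvDesc m ↔ 1 ≤ x ∧ x ≤ m := by
  simp only [pvDesc, List.mem_map, List.mem_range]
  constructor
  · rintro ⟨k, hk, rfl⟩; omega
  · rintro ⟨h1, h2⟩; exact ⟨m - x, by omega, by omega⟩

theorem pvDesc_pairwise (m : Nat) : (pvDesc m).Pairwise (· > ·) := by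
  induction m with
  | zero => simp [pvDesc]
  | succ n ih =>
      rw [pvDesc_succ]
      exact List.Pairwise.cons (fun y hy => by have := (pvDesc_mem n y).1 hy; omega) ih

-- find? on a strictly descending list returns the MAXIMUM element satisfying the predicate
theorem pvFind_desc_some (q : Nat → Bool) (l : List Nat) (h : l.Pairwise (· > ·)) (x : Nat) :
    l.find? q = some x ↔ q x = true ∧ x ∈ l ∧ ∀ y ∈ l, q y = true → y ≤ x := by
  induction l with
  | nil => simp
  | cons a t ih =>
      by_cases hqa : q a = true
      · rw [List.find?_cons_of_pos hqa]
        constructor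
        · intro h2
          obtain rfl : a = x := by injection h2
          exact ⟨hqa, by simp, fun y hy hqy => by
            rcases List.mem_cons.1 hy with rfl | hy'
            · exact le_rfl
            · exact le_of_lt (List.rel_of_pairwise_cons h hy')⟩
        · rintro ⟨hqx, hx, hmax⟩
          have hax : a ≤ x := hmax a (by simp) hqa
          rcases List.mem_cons.1 hx with rfl | hx'
          · rfl
          · have := List.rel_of_pairwise_cons h hx'; omega
      · rw [List.find?_cons_of_neg hqa, ih h.of_cons]
        constructor
        · rintro ⟨hqx, hx, hmax⟩
          exact ⟨hqx, List.mem_cons_of_mem a hx, fun y hy hqy => by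
            rcases List.mem_cons.1 hy with rfl | hy'
            · exact absurd hqy hqa
            · exact hmax y hy' hqy⟩
        · rintro ⟨hqx, hx, hmax⟩
          rcases List.mem_cons.1 hx with rfl | hx'
          · exact absurd hqx hqa
          · exact ⟨hqx, hx', fun y hy hqy => hmax y (List.mem_cons_of_mem a hy) hqy⟩

-- A's predicate on a candidate last-word length L at position idx
def pvP (cs : List Char) (dictL : List (List Char)) (table : List Nat) (idx L : Nat) : Bool :=
  decide ((L = idx + 1 ∨ table.getD (idx - L) 0 ≠ 0) ∧ (cs.drop (idx + 1 - L)).take L ∈ dictL)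

theorem pvAScan_eq_find (cs : List Char) (dictL : List (List Char)) (table : List Nat)
    (idx : Nat) (ps : List Nat) (h : ∀ p ∈ ps, p < idx) :
    pvAScan cs dictL table idx ps
      = (ps.map (fun p => idx - p)).find? (pvP cs dictL table idx) := by
  induction ps with
  | nil => rfl
  | cons p ps ih =>
      have hp : p < idx := h p (by simp)
      have h1 : idx - (idx - p) = p := by omega
      have h2 : idx + 1 - (idx - p) = p + 1 := by omega
      have h3 : ¬(idx - p = idx + 1) := by omega
      rw [List.map_cons]
      by_cases hc : table.getD p 0 ≠ 0 ∧ (cs.drop (p + 1)).take (idx - p) ∈ dictL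
      · rw [pvAScan, if_pos hc, List.find?_cons_of_pos]
        simp only [pvP, h1, h2, decide_eq_true_eq]
        exact ⟨Or.inr hc.1, hc.2⟩
      · rw [pvAScan, if_neg hc, List.find?_cons_of_neg, ih (fun x hx => h x (List.mem_cons_of_mem p hx))]
        simp only [pvP, h1, h2, decide_eq_true_eq, not_and]
        intro hcon hmem
        exact hc ⟨hcon.resolve_left h3, hmem⟩

-- the set of distinct word lengths: membership characterisation
theorem pvLens_mem (dictL : List (List Char)) (x : Nat) :
    x ∈ (PySem.Set.ofList (((dictL.filter (fun w => w ≠ [])).map List.length)) : List Nat)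
      ↔ ∃ w, w ∈ dictL ∧ w ≠ [] ∧ w.length = x := by
  rw [PySem.Set.mem_ofList]
  simp [List.mem_map, List.mem_filter]
  tauto

-- the max-keeping fold: result bounds and origin (order-independent characterisation)
theorem pvFoldBest (q : Nat → Prop) [DecidablePred q] (f : Nat → Nat → Nat)
    (hf : ∀ b L, f b L = if q L ∧ b < L then L else b) (Ls : List Nat) (b : Nat) :
    b ≤ Ls.foldl f b ∧ (∀ L ∈ Ls, q L → L ≤ Ls.foldl f b) ∧
      (Ls.foldl f b = b ∨ (Ls.foldl f b ∈ Ls ∧ q (Ls.foldl f b))) := by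
  induction Ls generalizing b with
  | nil => simp
  | cons a t ih =>
      rw [List.foldl_cons, hf]
      by_cases hc : q a ∧ b < a
      · rw [if_pos hc]
        obtain ⟨h1, h2, h3⟩ := ih a
        refine ⟨by omega, ?_, ?_⟩
        · intro L hL hqL
          rcases List.mem_cons.1 hL with rfl | hL'
          · exact h1
          · exact h2 L hL' hqL
        · rcases h3 with h3 | h3
          · refine Or.inr ⟨?_, ?_⟩ <;> rw [h3]
            · simp
            · exact hc.1
          · exact Or.inr ⟨List.mem_cons_of_mem a h3.1, h3.2⟩
      · rw [if_neg hc]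
        obtain ⟨h1, h2, h3⟩ := ih b
        refine ⟨h1, ?_, ?_⟩
        · intro L hL hqL
          rcases List.mem_cons.1 hL with rfl | hL'
          · by_cases hba : b < L
            · exact absurd ⟨hqL, hba⟩ hc
            · omega
          · exact h2 L hL' hqL
        · rcases h3 with h3 | h3
          · exact Or.inl h3
          · exact Or.inr ⟨List.mem_cons_of_mem a h3.1, h3.2⟩

-- one DP step of A = one DP step of B
theorem pvStep_eq (cs : List Char) (dictL : List (List Char)) (table : List Nat) (idx : Nat)
    (hidx : idx < cs.length) :
    pvAStep cs dictL table idx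
      = pvBStep cs (PySem.Set.ofList dictL)
          (PySem.Set.ofList (((dictL.filter (fun w => w ≠ [])).map List.length))) table idx := by
  set lens : List Nat := PySem.Set.ofList (((dictL.filter (fun w => w ≠ [])).map List.length)) with hlens
  -- A's step as a find? over the descending length list
  have hA : pvAStep cs dictL table idx
      = match (pvDesc (idx + 1)).find? (pvP cs dictL table idx) with
        | some v => table.set idx v
        | none => table := by
    rw [pvDesc_succ]
    by_cases hpre : cs.take (idx + 1) ∈ dictL
    · have hP1 : pvP cs dictL table idx (idx + 1) = true := by simp [pvP, hpre]
      rw [pvAStep, if_pos hpre, List.find?_cons_of_pos hP1]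
    · have hP1 : ¬ pvP cs dictL table idx (idx + 1) = true := by simp [pvP, hpre]
      rw [pvAStep, if_neg hpre, List.find?_cons_of_neg hP1,
        pvAScan_eq_find cs dictL table idx _ (fun p hp => List.mem_range.1 hp)]
      rfl
  -- the Prop a length is tested against (without the 'best < L' part)
  set q : Nat → Prop := fun L => L ≤ idx + 1 ∧ (L = idx + 1 ∨ table.getD (idx - L) 0 ≠ 0) ∧
      (cs.drop (idx + 1 - L)).take L ∈ (PySem.Set.ofList dictL : List (List Char)) with hq
  have hqP : ∀ L, 1 ≤ L → (q L ↔ (L ∈ pvDesc (idx + 1) ∧ pvP cs dictL table idx L = true)) := by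
    intro L h1
    simp only [hq, pvP, pvDesc_mem, decide_eq_true_eq, PySem.Set.mem_ofList]
    constructor
    · rintro ⟨hle, hdisj, hmem⟩; exact ⟨⟨h1, hle⟩, hdisj, hmem⟩
    · rintro ⟨⟨_, hle⟩, hdisj, hmem⟩; exact ⟨hle, hdisj, hmem⟩
  have hqlens : ∀ L, q L → 1 ≤ L → L ∈ lens := by
    intro L hqL h1
    have hle : L ≤ idx + 1 := hqL.1
    have hlen : ((cs.drop (idx + 1 - L)).take L).length = L := by
      rw [List.length_take, List.length_drop]; omega
    have hmem : (cs.drop (idx + 1 - L)).take L ∈ dictL := (PySem.Set.mem_ofList _ _).1 hqL.2.2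
    refine (pvLens_mem dictL L).2 ⟨_, hmem, ?_, hlen⟩
    intro hnil; rw [hnil] at hlen; simp at hlen; omega
  have hlens1 : ∀ L ∈ lens, 1 ≤ L := by
    intro L hL
    obtain ⟨w, _, hwne, hwlen⟩ := (pvLens_mem dictL L).1 hL
    have := List.length_pos_of_ne_nil hwne; omega
  obtain ⟨_, hub, horig⟩ := pvFoldBest q
    (fun best L => if L ≤ idx + 1 ∧ (L = idx + 1 ∨ table.getD (idx - L) 0 ≠ 0) ∧
        (cs.drop (idx + 1 - L)).take L ∈ (PySem.Set.ofList dictL : List (List Char)) ∧ best < L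
      then L else best)
    (by intro b L; simp only [hq]; by_cases h : q L ∧ b < L
        · obtain ⟨⟨ha, hb, hc⟩, hd⟩ := h
          rw [if_pos ⟨ha, hb, hc, hd⟩, if_pos ⟨⟨ha, hb, hc⟩, hd⟩]
        · rw [if_neg, if_neg h]
          intro ⟨ha, hb, hc, hd⟩; exact h ⟨⟨ha, hb, hc⟩, hd⟩)
    lens 0
  rw [hA, pvBStep]
  cases hfind : (pvDesc (idx + 1)).find? (pvP cs dictL table idx) with
  | none =>
      -- no valid length at all: best = 0
      have hnone := List.find?_eq_none.1 hfind
      have hb0 : pvBBest cs (PySem.Set.ofList dictL) lens table idx = 0 := by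
        rcases horig with h | ⟨hmem, hqb⟩
        · exact h
        · exfalso
          have h1 := hlens1 _ hmem
          have := (hqP _ h1).1 hqb
          exact absurd this.2 (by simpa using hnone _ this.1)
      rw [if_neg (by simp [hb0])]
  | some x =>
      obtain ⟨hqx, hxmem, hmax⟩ := (pvFind_desc_some _ _ (pvDesc_pairwise _) x).1 hfind
      have hx1 : 1 ≤ x := ((pvDesc_mem _ x).1 hxmem).1
      have hqx' : q x := (hqP x hx1).2 ⟨hxmem, hqx⟩
      have hxlens : x ∈ lens := hqlens x hqx' hx1
      have hxle : x ≤ pvBBest cs (PySem.Set.ofList dictL) lens table idx :=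
        hub x hxlens hqx'
      have hbe : pvBBest cs (PySem.Set.ofList dictL) lens table idx = x := by
        rcases horig with h | ⟨hmem, hqb⟩
        · have hb0 : pvBBest cs (PySem.Set.ofList dictL) lens table idx = 0 := h
          omega
        · have hbm : pvBBest cs (PySem.Set.ofList dictL) lens table idx ∈ lens := hmem
          have hbq : q (pvBBest cs (PySem.Set.ofList dictL) lens table idx) := hqb
          have h1 := hlens1 _ hbm
          have h2 := (hqP _ h1).1 hbq
          have h3 := hmax _ h2.1 h2.2
          omega
      rw [hbe, if_pos (by omega)]

-- the two DP tables coincide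
theorem pvTables_eq (cs : List Char) (dictL : List (List Char)) :
    (List.range cs.length).foldl (pvAStep cs dictL) (List.replicate cs.length 0)
      = (List.range cs.length).foldl
          (pvBStep cs (PySem.Set.ofList dictL)
            (PySem.Set.ofList (((dictL.filter (fun w => w ≠ [])).map List.length))))
          (List.replicate cs.length 0) := by
  apply PySem.List.foldl_congr_mem
  intro acc x hx
  exact pvStep_eq cs dictL acc x (List.mem_range.1 hx)

-- A's slice-collecting loop = B's cut-collecting loop mapped through the slice
theorem pvBuild_eq_cuts (cs : List Char) (table : List Nat) (fuel : Nat) (idx : Int) :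
    pvABuild cs table fuel idx
      = (pvBCuts table fuel idx).map
          (fun c => PySem.List.slice cs (some c.1) (some c.2)) := by
  induction fuel generalizing idx with
  | zero => rfl
  | succ n ih =>
      rw [pvABuild, pvBCuts]
      by_cases hneg : idx < 0
      · rw [if_pos hneg, if_pos hneg]; rfl
      · rw [if_neg hneg, if_neg hneg]
        simp only [List.map_cons, ih]

theorem pv_main (domain : String) (dictionary : List String)
    (hne : domain.toList ≠ []) :
    decompose_into_dictionary_words_tabulation domain dictionary
      = decompose_into_dictionary_words_tabulation_alt domain dictionary := by
  simp only [decompose_into_dictionary_words_tabulation,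
    decompose_into_dictionary_words_tabulation_alt]
  rw [← pvTables_eq domain.toList (dictionary.map String.toList)]
  set cs := domain.toList with hcs
  set table := (List.range cs.length).foldl
    (pvAStep cs (dictionary.map String.toList)) (List.replicate cs.length 0) with htable
  have htne : table ≠ [] := by
    have hlen : table.length = cs.length := by
      rw [htable]
      have : ∀ (l : List Nat) (acc : List Nat),
          (l.foldl (pvAStep cs (dictionary.map String.toList)) acc).length = acc.length := by
        intro l
        induction l with
        | nil => intro acc; rfl
        | cons a t ih =>
            intro acc
            rw [List.foldl_cons, ih]
            simp only [pvAStep]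
            split_ifs
            · simp
            · cases pvAScan cs (dictionary.map String.toList) acc a (List.range a) <;> simp
      rw [this, List.length_replicate]
    intro h
    rw [h] at hlen
    exact hne (List.eq_nil_of_length_eq_zero (by simpa using hlen.symm))
  rw [PySem.List.pyGet?_neg_one table]
  cases hlast : table.getLast? with
  | none => exact absurd (List.getLast?_eq_none_iff.1 hlast) htne
  | some t =>
      dsimp only [Option.getD_some]
      by_cases h0 : t = 0
      · rw [if_neg (by simp [h0]), if_pos h0]
      · rw [if_pos h0, if_neg h0, pvBuild_eq_cuts]
        simp [List.map_reverse, List.map_map, Function.comp]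

-- ===== VERDICT (by name: the statements are the Claim_ definitions above) =====
theorem decompose_into_dictionary_words_tabulation_spec : Claim_equal_decompose_into_dictionary_words_tabulation := by
  intro domain dictionary _ hpre
  exact pv_main domain dictionary hpre
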